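-- pv_equiv track=rewrite | github.com/Raju-Kaju/NER_Spacy | enhanced_entity_extractor_CustomEntity.py | organize_entities_enhanced
-- ===== SOURCE A (Python) =====
-- from collections import Counter
--
-- def organize_entities_enhanced(entities):
--     """
--     Enhanced organization that handles custom entities
--     """
--     organized = {}
--
--     for entity in entities:
--         label = entity['label']
--         entity_text = entity['text']
--
--         if label not in organized:
--             organized[label] = []
--
--         organized[label].append(entity_text)
--
--     # Count frequencies
--     for label in organized:
--         entity_counts = Counter(organized[label])
--         organized[label] = dict(entity_counts)
--
--     return organized
-- ===== SOURCE B (Python) =====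
-- def organize_entities_enhanced(entities):
--     # Label-major strategy: collect distinct labels in first-occurrence order,
--     # then for each label scan the entities once and count its texts.
--     labels = []
--     for entity in entities:
--         if entity['label'] not in labels:
--             labels.append(entity['label'])
--     organized = {}
--     for label in labels:
--         texts = [e['text'] for e in entities if e['label'] == label]
--         organized[label] = {t: texts.count(t) for t in dict.fromkeys(texts)}
--     return organized
-- ===== Notes on version B (the rewrite author's own statement) =====
-- stated objective: alternative
-- what changed: Label-major traversal: instead of folding every entity into a dict of lists and then Counter-ing each list, B first collects the distinct labels in first-occurrence order and then, per label, filters the entity list and counts each distinct text with list.count.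
import Mathlib
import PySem

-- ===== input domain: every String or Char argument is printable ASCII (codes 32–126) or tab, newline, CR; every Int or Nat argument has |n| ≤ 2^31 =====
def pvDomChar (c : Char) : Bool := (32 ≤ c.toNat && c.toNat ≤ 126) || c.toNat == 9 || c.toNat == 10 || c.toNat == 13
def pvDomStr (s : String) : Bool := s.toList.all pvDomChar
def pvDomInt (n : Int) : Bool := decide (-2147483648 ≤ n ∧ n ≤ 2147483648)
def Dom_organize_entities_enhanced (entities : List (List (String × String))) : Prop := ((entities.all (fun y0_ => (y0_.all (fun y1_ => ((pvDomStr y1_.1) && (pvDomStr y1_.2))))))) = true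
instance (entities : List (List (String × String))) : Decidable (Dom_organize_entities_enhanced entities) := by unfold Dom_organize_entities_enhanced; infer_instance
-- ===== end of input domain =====

-- B replaces A's entity-major fold (group texts per label into lists, then Counter each
-- list) by a label-major traversal: distinct labels first, then per-label filter + count.

-- shared accessors for the Python dict lookups entity['label'] / entity['text']
def pvLabel (e : List (String × String)) : String := (PySem.Dict.mk e).getD "label" ""
def pvText (e : List (String × String)) : String := (PySem.Dict.mk e).getD "text" ""

-- ===== PORT A =====
-- one iteration of A's first loop: append entity_text under its label
def pvAStep (d : PySem.Dict String (List String)) (entity : List (String × String)) :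
    PySem.Dict String (List String) :=
  let label := pvLabel entity
  let entity_text := pvText entity
  let d := if d.contains label then d else d.insert label []
  d.insert label (d.getD label [] ++ [entity_text])

def organize_entities_enhanced (entities : List (List (String × String))) :
    List (String × List (String × Int)) :=
  let organized := entities.foldl pvAStep PySem.Dict.empty
  -- second loop: for label in organized: organized[label] = dict(Counter(organized[label]))
  organized.items.map (fun p => (p.1, (PySem.Dict.counter p.2).items))

-- ===== PORT B =====
def organize_entities_enhanced_alt (entities : List (List (String × String))) :
    List (String × List (String × Int)) :=
  -- first loop: labels = distinct labels in first-occurrence order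
  let labels := entities.foldl (fun ls e => PySem.Set.add ls (pvLabel e)) PySem.Set.empty
  -- second loop: per label, filter the entities and count each distinct text
  labels.map (fun label =>
    let texts := (entities.filter (fun e => pvLabel e == label)).map pvText
    (label, (PySem.List.dedup texts).map (fun t => (t, (PySem.List.count texts t : Int)))))

-- ===== PRECONDITION & SPEC =====
-- Pre_ excludes entities lacking a 'label' or 'text' key, on which the Python A (and B) raises KeyError.
def Pre_organize_entities_enhanced (entities : List (List (String × String))) : Prop :=
  ∀ entity ∈ entities, "label" ∈ entity.map (·.1) ∧ "text" ∈ entity.map (·.1)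
instance (entities : List (List (String × String))) : Decidable (Pre_organize_entities_enhanced entities) := by unfold Pre_organize_entities_enhanced; infer_instance

def pvWitness_organize_entities_enhanced : (List (List (String × String))) :=
  [[("label", "PER"), ("text", "Alice")], [("label", "PER"), ("text", "Alice")], [("label", "ORG"), ("text", "ACME")]]

def Spec_organize_entities_enhanced (entities : List (List (String × String))) (out : List (String × List (String × Int))) : Prop := out = organize_entities_enhanced_alt entities
instance (entities : List (List (String × String))) (out : List (String × List (String × Int))) : Decidable (Spec_organize_entities_enhanced entities out) := by unfold Spec_organize_entities_enhanced; infer_instance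

-- ===== CLAIM =====
def Claim_equal_organize_entities_enhanced : Prop := ∀ (entities : List (List (String × String))), Dom_organize_entities_enhanced entities → Pre_organize_entities_enhanced entities → Spec_organize_entities_enhanced entities (organize_entities_enhanced entities)

-- ===== LEMMAS AND PROOFS =====

theorem pvAStep_eq (d : PySem.Dict String (List String)) (e : List (String × String)) :
    pvAStep d e = d.modify (pvLabel e) [] (· ++ [pvText e]) := by
  unfold pvAStep
  dsimp only
  by_cases h : d.contains (pvLabel e) = true
  · rw [if_pos h]; rfl
  · rw [if_neg h, PySem.Dict.getD_insert_self, PySem.Dict.insert_insert_self]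
    show d.insert (pvLabel e) ([] ++ [pvText e]) = d.insert (pvLabel e) (d.getD (pvLabel e) [] ++ [pvText e])
    rw [PySem.Dict.getD_of_not_contains _ _ (by simpa using h)]

theorem pv_afold (entities : List (List (String × String))) :
    entities.foldl pvAStep PySem.Dict.empty
      = (entities.map (fun e => (pvLabel e, pvText e))).foldl
          (fun d p => d.modify p.1 [] (· ++ [p.2])) PySem.Dict.empty := by
  have h : pvAStep = fun d e => d.modify (pvLabel e) [] (· ++ [pvText e]) :=
    funext fun d => funext fun e => pvAStep_eq d e
  rw [List.foldl_map, h]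

theorem pv_items (entities : List (List (String × String))) :
    (entities.foldl pvAStep PySem.Dict.empty).items
      = (PySem.Set.ofList (entities.map pvLabel)).map
          (fun l => (l, (entities.filter (fun e => pvLabel e == l)).map pvText)) := by
  rw [pv_afold]
  set pairs := entities.map (fun e => (pvLabel e, pvText e)) with hp
  set D := pairs.foldl (fun d p => d.modify p.1 [] (· ++ [p.2])) PySem.Dict.empty with hD
  have hkeys : D.keys = PySem.Set.ofList (entities.map pvLabel) := by
    rw [hD, PySem.Dict.keys_foldl_modify_key]
    simp [hp, PySem.Set.update, PySem.Set.ofList_eq_foldl, List.foldl_map, PySem.Dict.keys_empty]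
  have hnd : D.keys.Nodup := by
    rw [hkeys]; exact PySem.Set.nodup_ofList _
  have hget : ∀ c, D.getD c [] = (entities.filter (fun e => pvLabel e == c)).map pvText := by
    intro c
    rw [hD, PySem.Dict.getD_foldl_modify_append, PySem.Dict.getD_empty]
    simp [hp, List.filter_map, List.map_map, Function.comp_def]
  rw [PySem.Dict.items_eq_map_keys D hnd [], hkeys]
  simp only [hget]

-- ===== VERDICT =====
theorem organize_entities_enhanced_spec : Claim_equal_organize_entities_enhanced := by
  intro entities _ _
  unfold Spec_organize_entities_enhanced organize_entities_enhanced organize_entities_enhanced_alt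
  dsimp only
  have hlab : entities.foldl (fun ls e => PySem.Set.add ls (pvLabel e)) PySem.Set.empty
      = PySem.Set.ofList (entities.map pvLabel) := by
    simp [PySem.Set.ofList_eq_foldl, List.foldl_map, PySem.Set.empty]
  rw [pv_items, hlab, List.map_map]
  refine List.map_congr_left (fun l _ => ?_)
  simp [PySem.Dict.items_counter, PySem.List.dedup_eq_ofList, PySem.List.count_eq]
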